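-- pv_equiv track=rewrite | github.com/BrettRey/erdos-problem-993 | analyze_sst.py | make_subdivided_star
-- ===== SOURCE A (Python) =====
-- def make_subdivided_star(arms: int, subdivisions: int = 1):
--     """
--     Subdivided star: center vertex with 'subdivisions' intermediate vertices on each arm.
--     """
--     n = 1 + arms * (subdivisions + 1)  # center + arms * (subdivisions + leaf)
--     adj = [[] for _ in range(n)]
--
--     center = 0
--     for i in range(arms):
--         prev = center
--         for j in range(subdivisions):
--             node = 1 + i * (subdivisions + 1) + j
--             adj[prev].append(node)
--             adj[node].append(prev)
--             prev = node
--         # Add leaf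
--         leaf = 1 + i * (subdivisions + 1) + subdivisions
--         adj[prev].append(leaf)
--         adj[leaf].append(prev)
--
--     return n, adj
-- ===== SOURCE B (Python) =====
-- def make_subdivided_star(arms: int, subdivisions: int = 1):
--     """Per-vertex closed form: decode each vertex's arm position arithmetically."""
--     n = 1 + arms * (subdivisions + 1)
--     L = subdivisions + 1
--     adj = []
--     for v in range(n):
--         if v == 0:
--             adj.append([1 + i * L for i in range(arms)])
--         else:
--             p = (v - 1) % L
--             nbrs = [0 if p == 0 else v - 1]
--             if p < subdivisions:
--                 nbrs.append(v + 1)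
--             adj.append(nbrs)
--     return n, adj
-- ===== Notes on version B (the rewrite author's own statement) =====
-- stated objective: alternative
-- what changed: B replaces A's incremental prev-pointer edge appends with a per-vertex closed form: each vertex's neighbor list is computed directly by decoding its arm position p=(v-1)%(subdivisions+1), so no mutable adjacency structure or prev pointer is maintained.
-- outside the precondition, e.g. on make_subdivided_star(1, -1): A returns (1, [[0, 0]]), B returns (1, [[1]]); on make_subdivided_star(-3, -2): A returns (4, [[], [], [], []]), B returns (4, [[], [0], [0], [0]])
import Mathlib
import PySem

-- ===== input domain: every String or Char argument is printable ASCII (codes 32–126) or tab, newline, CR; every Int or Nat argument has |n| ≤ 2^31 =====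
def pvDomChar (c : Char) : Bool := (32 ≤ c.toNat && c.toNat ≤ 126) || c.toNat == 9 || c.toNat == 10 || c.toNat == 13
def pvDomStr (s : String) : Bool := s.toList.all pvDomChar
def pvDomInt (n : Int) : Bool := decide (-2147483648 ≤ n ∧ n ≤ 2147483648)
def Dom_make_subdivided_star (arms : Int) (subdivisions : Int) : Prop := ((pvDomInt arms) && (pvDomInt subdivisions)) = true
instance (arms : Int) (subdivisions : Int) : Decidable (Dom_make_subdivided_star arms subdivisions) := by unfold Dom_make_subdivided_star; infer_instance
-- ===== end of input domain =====

-- B computes each vertex's neighbor list by a per-vertex closed form (arm-position decoding)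
-- instead of A's incremental prev-pointer appends; same cost, different decomposition.

-- ===== PORT A =====
-- adj[idx].append(x) on a list of lists (Python wrap for negative idx; in range on Pre_)
def pvAppendAt (adj : List (List Int)) (idx : Int) (x : Int) : List (List Int) :=
  let i : Int := if idx < 0 then idx + adj.length else idx
  adj.modify i.toNat (· ++ [x])

-- body of A's inner `for j in range(subdivisions)` loop; state = (adj, prev)
def pvA_innerStep (s k : Int) (st : List (List Int) × Int) (j : Int) : List (List Int) × Int :=
  let node := 1 + k * (s + 1) + j
  let adj := pvAppendAt st.1 st.2 node
  let adj := pvAppendAt adj node st.2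
  (adj, node)

-- body of A's outer `for i in range(arms)` loop
def pvA_armBody (s : Int) (adj : List (List Int)) (i : Int) : List (List Int) :=
  let st := (PySem.List.pyRange 0 s 1).foldl (pvA_innerStep s i) (adj, 0)
  let leaf := 1 + i * (s + 1) + s
  let adj2 := pvAppendAt st.1 st.2 leaf
  pvAppendAt adj2 leaf st.2

def make_subdivided_star (arms : Int) (subdivisions : Int) : Int × List (List Int) :=
  let n := 1 + arms * (subdivisions + 1)
  let adj := (PySem.List.pyRange 0 n 1).map (fun _ => ([] : List Int))
  let adj := (PySem.List.pyRange 0 arms 1).foldl (pvA_armBody subdivisions) adj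
  (n, adj)

-- ===== PORT B =====
-- neighbor row of vertex v, computed in closed form (body of B's loop over v)
def pvB_row (arms s v : Int) : List Int :=
  if v = 0 then (PySem.List.pyRange 0 arms 1).map (fun i => 1 + i * (s + 1))
  else
    let p := PySem.Int.mod (v - 1) (s + 1)
    let nbrs := if p = 0 then [(0 : Int)] else [v - 1]
    if p < s then nbrs ++ [v + 1] else nbrs

def make_subdivided_star_alt (arms : Int) (subdivisions : Int) : Int × List (List Int) :=
  let n := 1 + arms * (subdivisions + 1)
  (n, (PySem.List.pyRange 0 n 1).map (pvB_row arms subdivisions))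

-- ===== PRECONDITION & SPEC =====
-- Pre_ keeps the function's natural domain (subdivisions ≥ 0, or the trivial arms = 0 star);
-- outside it A either raises IndexError (arms ≥ 1, subdivisions ≤ -2) or returns accidental
-- lists produced by negative arithmetic (self-loop rows at subdivisions = -1, untouched empty
-- rows for negative arms), which B does not reproduce.
def Pre_make_subdivided_star (arms : Int) (subdivisions : Int) : Prop :=
  0 ≤ subdivisions ∨ arms = 0
instance (arms : Int) (subdivisions : Int) : Decidable (Pre_make_subdivided_star arms subdivisions) := by
  unfold Pre_make_subdivided_star; infer_instance

def pvWitness_make_subdivided_star : Int × Int := (3, 2)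

def Spec_make_subdivided_star (arms : Int) (subdivisions : Int) (out : Int × List (List Int)) : Prop := out = make_subdivided_star_alt arms subdivisions
instance (arms : Int) (subdivisions : Int) (out : Int × List (List Int)) : Decidable (Spec_make_subdivided_star arms subdivisions out) := by unfold Spec_make_subdivided_star; infer_instance

-- ===== CLAIM (what is proved, stated in full; the proofs are below) =====
def Claim_equal_make_subdivided_star : Prop := ∀ (arms : Int) (subdivisions : Int), Dom_make_subdivided_star arms subdivisions → Pre_make_subdivided_star arms subdivisions → Spec_make_subdivided_star arms subdivisions (make_subdivided_star arms subdivisions)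

-- ===== LEMMAS AND PROOFS =====

-- adjacency rows written as a map over the vertex range
def pvMapN (n : Int) (f : Int → List Int) : List (List Int) :=
  (PySem.List.pyRange 0 n 1).map f

-- A's prev pointer after j inner steps of arm k
def pvPrev (s k j : Int) : Int := if j = 0 then 0 else k * (s + 1) + j

-- entries appended to vertex v by arm k after j inner steps
def pvE (s k j v : Int) : List Int :=
  if v = 0 then (if 1 ≤ j then [1 + k * (s + 1)] else [])
  else if 1 + k * (s + 1) ≤ v ∧ v < 1 + k * (s + 1) + j then
    (if v = 1 + k * (s + 1) then [(0 : Int)] else [v - 1]) ++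
    (if v < k * (s + 1) + j then [v + 1] else [])
  else []

-- entries appended to vertex v by the whole of arm k (inner loop plus leaf step)
def pvD (s k v : Int) : List Int :=
  if v = 0 then [1 + k * (s + 1)]
  else if 1 + k * (s + 1) ≤ v ∧ v ≤ 1 + k * (s + 1) + s then
    (if v = 1 + k * (s + 1) then [(0 : Int)] else [v - 1]) ++
    (if v < 1 + k * (s + 1) + s then [v + 1] else [])
  else []

-- final row of a non-center vertex
def pvFullEntry (s v : Int) : List Int :=
  (if PySem.Int.mod (v - 1) (s + 1) = 0 then [(0 : Int)] else [v - 1]) ++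
  (if PySem.Int.mod (v - 1) (s + 1) < s then [v + 1] else [])

-- adjacency after the first k arms have been processed
def pvFull (s k v : Int) : List Int :=
  if v = 0 then (PySem.List.pyRange 0 k 1).map (fun i => 1 + i * (s + 1))
  else if v ≤ k * (s + 1) then pvFullEntry s v else []

lemma appendAt_mapN (f : Int → List Int) (N i : Int) (h0 : 0 ≤ i) (x : Int) :
    pvAppendAt (pvMapN N f) i x
      = pvMapN N (fun v => if v = i then f v ++ [x] else f v) := by
  unfold pvAppendAt pvMapN
  simp only [not_lt.mpr h0, if_false]
  apply List.ext_getElem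
  · simp
  · intro j h1 h2
    have hlen : (PySem.List.pyRange 0 N 1).length = (N - 0).toNat := PySem.List.length_pyRange_one 0 N
    have hj : j < (PySem.List.pyRange 0 N 1).length := by
      simp at h2; simpa [hlen] using h2
    rw [List.getElem_modify]
    rw [List.getElem_map, List.getElem_map, PySem.List.getElem_pyRange_one]
    have heq : (i.toNat = j) ↔ ((0 : Int) + (j : Int) = i) := by omega
    by_cases hc : i.toNat = j
    · rw [if_pos hc, if_pos (heq.mp hc)]
    · rw [if_neg hc, if_neg fun hh => hc (heq.mpr hh)]

lemma inner_inv (s k a : Int) (hs : 0 ≤ s) (hk : 0 ≤ k) (hka : k < a) (F : Int → List Int) :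
    ∀ (c : ℕ) (j : Int), 0 ≤ j → j + c = s →
    (PySem.List.pyRange j s 1).foldl (pvA_innerStep s k)
        (pvMapN (1 + a * (s + 1)) (fun v => F v ++ pvE s k j v), pvPrev s k j)
      = (pvMapN (1 + a * (s + 1)) (fun v => F v ++ pvE s k s v), pvPrev s k s) := by
  have hK : 0 ≤ k * (s + 1) := mul_nonneg hk (by omega)
  have hKA : k * (s + 1) + (s + 1) ≤ a * (s + 1) := by
    have h1 : (k + 1) * (s + 1) ≤ a * (s + 1) :=
      mul_le_mul_of_nonneg_right (by omega : k + 1 ≤ a) (by omega : (0:Int) ≤ s + 1)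
    nlinarith [h1]
  intro c
  induction c with
  | zero =>
    intro j hj hjs
    have : j = s := by omega
    subst this
    rw [PySem.List.pyRange_one_eq_nil (by omega)]
    rfl
  | succ c ih =>
    intro j hj hjs
    have hjlt : j < s := by omega
    rw [PySem.List.pyRange_one_cons (by omega : j < s), List.foldl_cons]
    have hstep : pvA_innerStep s k
        (pvMapN (1 + a * (s + 1)) (fun v => F v ++ pvE s k j v), pvPrev s k j) j
        = (pvMapN (1 + a * (s + 1)) (fun v => F v ++ pvE s k (j + 1) v), pvPrev s k (j + 1)) := by
      unfold pvA_innerStep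
      simp only
      rw [appendAt_mapN _ _ _ (by unfold pvPrev; split_ifs <;> omega)]
      rw [appendAt_mapN _ _ _ (by omega)]
      refine Prod.ext ?_ ?_
      · show pvMapN _ _ = pvMapN _ _
        congr 1
        funext v
        simp only [pvE, pvPrev]
        split_ifs <;> first | omega | rfl | (simp <;> omega) | simp
      · show 1 + k * (s + 1) + j = pvPrev s k (j + 1)
        unfold pvPrev
        split_ifs <;> omega
    rw [hstep]
    exact ih (j + 1) (by omega) (by omega)

lemma arm_body (s a k : Int) (hs : 0 ≤ s) (hk : 0 ≤ k) (hka : k < a) (F : Int → List Int) :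
    pvA_armBody s (pvMapN (1 + a * (s + 1)) F) k
      = pvMapN (1 + a * (s + 1)) (fun v => F v ++ pvD s k v) := by
  have hK : 0 ≤ k * (s + 1) := mul_nonneg hk (by omega)
  have hKA : k * (s + 1) + (s + 1) ≤ a * (s + 1) := by
    have h1 : (k + 1) * (s + 1) ≤ a * (s + 1) :=
      mul_le_mul_of_nonneg_right (by omega : k + 1 ≤ a) (by omega : (0:Int) ≤ s + 1)
    nlinarith [h1]
  unfold pvA_armBody
  have h0 : pvMapN (1 + a * (s + 1)) F
      = pvMapN (1 + a * (s + 1)) (fun v => F v ++ pvE s k 0 v) := by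
    congr 1
    funext v
    simp only [pvE]
    split_ifs <;> first | omega | rfl | (simp <;> omega) | simp
  have hfold := inner_inv s k a hs hk hka F s.toNat 0 (by omega) (by omega)
  rw [h0]
  have hprev0 : pvPrev s k 0 = 0 := by simp [pvPrev]
  rw [hprev0] at hfold
  rw [hfold]
  simp only
  rw [appendAt_mapN _ _ _ (by unfold pvPrev; split_ifs <;> omega)]
  rw [appendAt_mapN _ _ _ (by omega)]
  congr 1
  funext v
  simp only [pvE, pvD, pvPrev]
  split_ifs <;> first | omega | rfl | (simp <;> omega) | simp

lemma pvMapN_congr (n : Int) (f g : Int → List Int)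
    (h : ∀ v, 0 ≤ v → v < n → f v = g v) : pvMapN n f = pvMapN n g := by
  unfold pvMapN
  exact List.map_congr_left fun v hv => by
    have := PySem.List.mem_pyRange_one.mp hv
    exact h v this.1 this.2

lemma mod_arm (s k v : Int) (hs : 0 ≤ s) (h1 : k * (s + 1) < v - 1 + 1)
    (h2 : v ≤ (k + 1) * (s + 1)) :
    PySem.Int.mod (v - 1) (s + 1) = v - 1 - k * (s + 1) := by
  have hK1 : (k + 1) * (s + 1) = k * (s + 1) + (s + 1) := by ring
  rw [PySem.Int.mod_eq_emod_of_pos (by omega)]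
  have h3 : v - 1 = (v - 1 - k * (s + 1)) + (s + 1) * k := by ring
  calc (v - 1) % (s + 1) = ((v - 1 - k * (s + 1)) + (s + 1) * k) % (s + 1) := by rw [← h3]
    _ = (v - 1 - k * (s + 1)) % (s + 1) := Int.add_mul_emod_self_left _ _ _
    _ = v - 1 - k * (s + 1) := Int.emod_eq_of_lt (by omega) (by omega)

lemma outer_inv (s a : Int) (hs : 0 ≤ s) :
    ∀ (c : ℕ) (k : Int), 0 ≤ k → k + c = a →
    (PySem.List.pyRange k a 1).foldl (pvA_armBody s) (pvMapN (1 + a * (s + 1)) (pvFull s k))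
      = pvMapN (1 + a * (s + 1)) (pvFull s a) := by
  intro c
  induction c with
  | zero =>
    intro k hk hka
    have : k = a := by omega
    subst this
    rw [PySem.List.pyRange_one_eq_nil (by omega)]
    rfl
  | succ c ih =>
    intro k hk hka
    have hklt : k < a := by omega
    have hK : 0 ≤ k * (s + 1) := mul_nonneg hk (by omega)
    have hKA : k * (s + 1) + (s + 1) ≤ a * (s + 1) := by
      have h1 : (k + 1) * (s + 1) ≤ a * (s + 1) :=
        mul_le_mul_of_nonneg_right (by omega : k + 1 ≤ a) (by omega : (0:Int) ≤ s + 1)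
      nlinarith [h1]
    have hK1 : (k + 1) * (s + 1) = k * (s + 1) + (s + 1) := by ring
    rw [PySem.List.pyRange_one_cons (by omega : k < a), List.foldl_cons]
    rw [arm_body s a k hs hk hklt]
    have hstep : pvMapN (1 + a * (s + 1)) (fun v => pvFull s k v ++ pvD s k v)
        = pvMapN (1 + a * (s + 1)) (pvFull s (k + 1)) := by
      apply pvMapN_congr
      intro v hv0 hvn
      by_cases hv : v = 0
      · subst hv
        simp only [pvFull, pvD]
        simp only [if_true]
        rw [PySem.List.pyRange_one_succ_right hk]
        simp
      · simp only [pvFull, pvD, if_neg hv]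
        by_cases hle : v ≤ k * (s + 1)
        · rw [if_pos hle, if_pos (by omega : v ≤ (k + 1) * (s + 1)),
              if_neg (by omega : ¬(1 + k * (s + 1) ≤ v ∧ v ≤ 1 + k * (s + 1) + s))]
          simp
        · by_cases hhi : v ≤ (k + 1) * (s + 1)
          · rw [if_neg hle, if_pos hhi,
                if_pos (by omega : 1 + k * (s + 1) ≤ v ∧ v ≤ 1 + k * (s + 1) + s)]
            have hm := mod_arm s k v hs (by omega) hhi
            simp only [pvFullEntry, hm, List.nil_append]
            split_ifs <;> first | omega | rfl | (simp <;> omega) | simp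
          · rw [if_neg hle, if_neg hhi,
                if_neg (by omega : ¬(1 + k * (s + 1) ≤ v ∧ v ≤ 1 + k * (s + 1) + s))]
            simp
    rw [hstep]
    exact ih (k + 1) (by omega) (by omega)

lemma main_eq (arms s : Int) (ha : 0 ≤ arms) (hs : 0 ≤ s) :
    make_subdivided_star arms s = make_subdivided_star_alt arms s := by
  unfold make_subdivided_star make_subdivided_star_alt
  simp only
  have hinit : (PySem.List.pyRange 0 (1 + arms * (s + 1)) 1).map (fun _ => ([] : List Int))
      = pvMapN (1 + arms * (s + 1)) (pvFull s 0) := by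
    apply pvMapN_congr
    intro v hv0 hvn
    simp only [pvFull]
    split_ifs with h1 h2
    · simp [PySem.List.pyRange_one_eq_nil]
    · omega
    · rfl
  rw [hinit, outer_inv s arms hs arms.toNat 0 (by omega) (by omega)]
  refine congrArg _ ?_
  apply pvMapN_congr
  intro v hv0 hvn
  by_cases hv : v = 0
  · subst hv; rfl
  · have hA : 0 ≤ arms * (s + 1) := mul_nonneg ha (by omega)
    simp only [pvFull, pvB_row, if_neg hv, if_pos (by omega : v ≤ arms * (s + 1)),
      pvFullEntry]
    split_ifs <;> simp

lemma degen_neg (arms s : Int) (ha : arms < 0) (hs : 0 ≤ s) :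
    make_subdivided_star arms s = make_subdivided_star_alt arms s := by
  have hn : 1 + arms * (s + 1) ≤ 0 := by nlinarith
  unfold make_subdivided_star make_subdivided_star_alt
  simp only
  rw [PySem.List.pyRange_one_eq_nil (by omega : 1 + arms * (s + 1) ≤ 0),
      PySem.List.pyRange_one_eq_nil (by omega : arms ≤ 0)]
  rfl

lemma degen_zero (s : Int) :
    make_subdivided_star 0 s = make_subdivided_star_alt 0 s := by
  unfold make_subdivided_star make_subdivided_star_alt pvB_row
  norm_num [PySem.List.pyRange_one, PySem.List.pyRange_one_eq_nil]

-- ===== VERDICT (by name: the statement is the Claim_ definition above) =====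
theorem make_subdivided_star_spec : Claim_equal_make_subdivided_star := by
  intro arms s _hdom hpre
  unfold Spec_make_subdivided_star
  by_cases hs : 0 ≤ s
  · rcases Int.lt_or_le arms 0 with ha | ha
    · exact degen_neg arms s ha hs
    · exact main_eq arms s ha hs
  · have ha0 : arms = 0 := by
      rcases hpre with h | h
      · exact absurd h hs
      · exact h
    subst ha0
    exact degen_zero s
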